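-- pv_equiv track=rewrite | github.com/Haizhouzhou/ATAI | Project Submission 2/agent/composer.py | _dedup_and_join
-- ===== SOURCE A (Python) =====
-- from typing import Optional, Dict, List
--
-- def _dedup_and_join(vals: List[str]) -> str:
--     """
--     Deduplicate answers ignoring case, keep the longest surface form per key,
--     then join with ' and ' as requested by the rubric.
--     """
--     seen: Dict[str, str] = {}
--     for v in vals or []:
--         if v is None:
--             continue
--         s = str(v).strip()
--         if not s:
--             continue
--         k = s.lower()
--         if k not in seen or len(s) > len(seen[k]):
--             seen[k] = s
--     return " and ".join(seen.values())
-- ===== SOURCE B (Python) =====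
-- from typing import Optional, Dict, List
--
-- def _dedup_and_join(vals: List[str]) -> str:
--     # No dict at all: clean once, then recursively take the first remaining
--     # key, scan the rest for its longest surface form (first-longest wins via
--     # strict >), and recurse on the rest with that key's occurrences removed.
--     cleaned = [s for s in (str(v).strip() for v in vals or [] if v is not None) if s]
--
--     def pick(cs: List[str]) -> List[str]:
--         if not cs:
--             return []
--         head, rest = cs[0], cs[1:]
--         k = head.lower()
--         best = head
--         for t in rest:
--             if t.lower() == k and len(t) > len(best):
--                 best = t
--         return [best] + pick([t for t in rest if t.lower() != k])
--
--     return " and ".join(pick(cleaned))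
-- ===== Notes on version B (the rewrite author's own statement) =====
-- stated objective: alternative
-- what changed: B drops the dict entirely: it cleans the list once, then recursively takes the first remaining key, scans the tail for that key's longest form, and recurses on the tail with that key's occurrences filtered out.
import Mathlib
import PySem

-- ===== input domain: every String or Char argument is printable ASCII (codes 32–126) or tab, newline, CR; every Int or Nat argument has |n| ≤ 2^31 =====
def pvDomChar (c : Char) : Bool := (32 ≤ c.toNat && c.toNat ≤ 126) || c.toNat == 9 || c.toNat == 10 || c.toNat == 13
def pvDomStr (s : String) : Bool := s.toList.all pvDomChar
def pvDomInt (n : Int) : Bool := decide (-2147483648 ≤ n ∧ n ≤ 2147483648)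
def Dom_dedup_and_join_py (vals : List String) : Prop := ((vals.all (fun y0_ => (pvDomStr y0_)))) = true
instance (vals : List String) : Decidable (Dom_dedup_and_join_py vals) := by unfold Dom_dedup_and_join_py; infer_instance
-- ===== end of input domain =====

-- B replaces A's running dict with a dict-free recursion: clean once, then repeatedly take the first
-- remaining key, scan the tail for its longest form, and recurse with that key filtered out (alternative).

-- ===== PORT A =====
def dedup_and_join_py (vals : List String) : String :=
  let seen := vals.foldl (fun (seen : PySem.Dict String String) v =>
    let s := PySem.Str.strip v
    if s = "" then seen
    else
      let k := PySem.Str.lower s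
      if seen.contains k = false ∨ PySem.Str.len s > PySem.Str.len (seen.getD k "") then
        seen.insert k s
      else seen) PySem.Dict.empty
  PySem.Str.join " and " seen.values

-- ===== PORT B =====
-- pick: cs[0]'s key, the longest form for that key scanned from the rest (strict >, so the
-- earliest longest wins), then recurse on the rest with that key's occurrences removed.
def pvPick : List String → List String
  | [] => []
  | head :: rest =>
    let k := PySem.Str.lower head
    let best := rest.foldl (fun b t =>
      if PySem.Str.lower t = k ∧ PySem.Str.len t > PySem.Str.len b then t else b) head
    best :: pvPick (rest.filter (fun t => !(PySem.Str.lower t == k)))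
termination_by cs => cs.length
decreasing_by
  simp only [List.length_cons]
  exact Nat.lt_succ_of_le (le_trans (by simpa using List.length_filter_le _ rest.attach) (by simp))

-- 'v is None' and 'str(v)' are no-ops on arguments typed List String, as in A's port.
def dedup_and_join_py_alt (vals : List String) : String :=
  let cleaned := (vals.map PySem.Str.strip).filter (fun s => !(s == ""))
  PySem.Str.join " and " (pvPick cleaned)

-- ===== PRECONDITION & SPEC =====
def Spec_dedup_and_join_py (vals : List String) (out : String) : Prop := out = dedup_and_join_py_alt vals
instance (vals : List String) (out : String) : Decidable (Spec_dedup_and_join_py vals out) := by unfold Spec_dedup_and_join_py; infer_instance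

-- ===== CLAIM (what is proved, stated in full; the proofs are below) =====
def Claim_equal_dedup_and_join_py : Prop := ∀ (vals : List String), Dom_dedup_and_join_py vals → Spec_dedup_and_join_py vals (dedup_and_join_py vals)

-- ===== LEMMAS AND PROOFS =====

-- A's loop body on one surviving stripped string
def pvUpd (seen : PySem.Dict String String) (s : String) : PySem.Dict String String :=
  if seen.contains (PySem.Str.lower s) = false ∨
      PySem.Str.len s > PySem.Str.len (seen.getD (PySem.Str.lower s) "") then
    seen.insert (PySem.Str.lower s) s
  else seen

-- running "keep the strictly longer" fold
def pvBestF (b : String) (l : List String) : String :=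
  l.foldl (fun b t => if PySem.Str.len b < PySem.Str.len t then t else b) b

theorem pvLen_zero (s : String) (h : PySem.Str.len s = 0) : s = "" := by
  rw [PySem.Str.len_eq] at h
  exact String.ext (List.eq_nil_of_length_eq_zero (by exact_mod_cast h))

theorem pvStep_empty (s : String) :
    (if PySem.Str.len "" < PySem.Str.len s then s else "") = s := by
  by_cases h : PySem.Str.len "" < PySem.Str.len s
  · rw [if_pos h]
  · rw [if_neg h]
    have h0 : PySem.Str.len "" = 0 := rfl
    have hnn : 0 ≤ PySem.Str.len s := by
      rw [PySem.Str.len_eq]; exact Int.natCast_nonneg _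
    exact (pvLen_zero s (by omega)).symm

-- A's fold over vals is the pvUpd-fold over the cleaned list
theorem foldA_eq_cleaned (vals : List String) : ∀ (seen : PySem.Dict String String),
    vals.foldl (fun (seen : PySem.Dict String String) v =>
      let s := PySem.Str.strip v
      if s = "" then seen
      else
        let k := PySem.Str.lower s
        if seen.contains k = false ∨ PySem.Str.len s > PySem.Str.len (seen.getD k "") then
          seen.insert k s
        else seen) seen
    = ((vals.map PySem.Str.strip).filter (fun s => !(s == ""))).foldl pvUpd seen := by
  induction vals with
  | nil => intro seen; rfl
  | cons v vs ih =>
      intro seen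
      simp only [List.foldl_cons, List.map_cons, List.filter_cons]
      rw [ih]
      by_cases h : PySem.Str.strip v = ""
      · rw [if_pos h, h]
        rfl
      · have hb : (PySem.Str.strip v == "") = false := beq_eq_false_iff_ne.mpr h
        rw [if_neg h, hb]
        rw [show (!false) = true from rfl, if_pos rfl, List.foldl_cons]
        rfl

-- keys of the pvUpd-fold
theorem keys_foldl_upd (cs : List String) : ∀ (seen : PySem.Dict String String),
    (cs.foldl pvUpd seen).keys = PySem.Set.update seen.keys (cs.map PySem.Str.lower) := by
  induction cs with
  | nil => intro seen; rw [List.map_nil, PySem.Set.update_nil]; rfl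
  | cons s cs ih =>
      intro seen
      have hstep : (pvUpd seen s).keys = PySem.Set.add seen.keys (PySem.Str.lower s) := by
        unfold pvUpd
        cases hc : seen.contains (PySem.Str.lower s) with
        | false =>
            rw [if_pos (Or.inl rfl), PySem.Dict.keys_insert_of_not_contains _ _ hc,
              PySem.Set.add_of_not_mem (fun hm => by
                rw [(PySem.Dict.contains_iff_mem_keys _ _).mpr hm] at hc; cases hc)]
        | true =>
            have hmem : PySem.Str.lower s ∈ seen.keys := (PySem.Dict.contains_iff_mem_keys _ _).mp hc
            by_cases hlen : PySem.Str.len s > PySem.Str.len (seen.getD (PySem.Str.lower s) "")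
            · rw [if_pos (Or.inr hlen), PySem.Dict.keys_insert_of_contains _ _ hc,
                PySem.Set.add_of_mem hmem]
            · rw [if_neg (fun hcon => hcon.elim (fun hcf => nomatch hcf) hlen),
                PySem.Set.add_of_mem hmem]
      rw [List.foldl_cons, List.map_cons, PySem.Set.update_cons, ih, hstep]

-- lookup of the pvUpd-fold: running first-longest over the elements of that key
theorem getD_foldl_upd (cs : List String) : ∀ (seen : PySem.Dict String String) (k : String),
    (cs.foldl pvUpd seen).getD k "" =
      pvBestF (seen.getD k "") (cs.filter (fun t => PySem.Str.lower t == k)) := by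
  induction cs with
  | nil => intro seen k; rfl
  | cons s cs ih =>
      intro seen k
      rw [List.foldl_cons, List.filter_cons, ih]
      by_cases hk : PySem.Str.lower s = k
      · subst hk
        rw [if_pos (by simp)]
        have hbody : (pvUpd seen s).getD (PySem.Str.lower s) "" =
            (if PySem.Str.len (seen.getD (PySem.Str.lower s) "") < PySem.Str.len s then s
             else seen.getD (PySem.Str.lower s) "") := by
          unfold pvUpd
          cases hc : seen.contains (PySem.Str.lower s) with
          | false =>
              rw [if_pos (Or.inl rfl), PySem.Dict.getD_insert_self,
                PySem.Dict.getD_of_not_contains _ _ hc, pvStep_empty]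
          | true =>
              by_cases hlen : PySem.Str.len s > PySem.Str.len (seen.getD (PySem.Str.lower s) "")
              · rw [if_pos (Or.inr hlen), PySem.Dict.getD_insert_self, if_pos (by omega)]
              · rw [if_neg (fun hcon => hcon.elim (fun hcf => nomatch hcf) hlen),
                  if_neg (by omega)]
        rw [hbody]
        rfl
      · rw [if_neg (by simpa using hk)]
        have hkeep : (pvUpd seen s).getD k "" = seen.getD k "" := by
          unfold pvUpd
          split
          · exact PySem.Dict.getD_insert_of_ne _ _ _ (fun hEq => hk hEq.symm)
          · rfl
        rw [hkeep]

-- B's inner scan is the unguarded fold over the filtered tail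
theorem guard_fold_eq_filter (k : String) (rest : List String) : ∀ (b : String),
    rest.foldl (fun b t =>
      if PySem.Str.lower t = k ∧ PySem.Str.len t > PySem.Str.len b then t else b) b
    = pvBestF b (rest.filter (fun t => PySem.Str.lower t == k)) := by
  induction rest with
  | nil => intro b; rfl
  | cons t rest ih =>
      intro b
      rw [List.filter_cons]
      by_cases hk : PySem.Str.lower t = k
      · rw [if_pos (by simpa using hk), List.foldl_cons, ih]
        unfold pvBestF
        rw [List.foldl_cons]
        congr 1
        by_cases h : PySem.Str.len b < PySem.Str.len t
        · rw [if_pos ⟨hk, h⟩, if_pos h]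
        · rw [if_neg (fun hc => h hc.2), if_neg h]
      · rw [if_neg (by simpa using hk), List.foldl_cons,
          if_neg (fun hc => hk hc.1)]
        exact ih b

-- Set.discard computes a filter
theorem discard_eq_filter (s : List String) (x : String) :
    PySem.Set.discard s x = s.filter (fun y => !(y == x)) := rfl

-- first-occurrence dedup commutes with removing one value
theorem ofList_filter_ne (l : List String) : ∀ (x : String),
    (PySem.Set.ofList l).filter (fun y => !(y == x))
      = PySem.Set.ofList (l.filter (fun y => !(y == x))) := by
  induction l with
  | nil => intro x; rfl
  | cons a l ih =>
      intro x
      rw [PySem.Set.ofList_cons, discard_eq_filter, List.filter_cons, List.filter_cons]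
      by_cases hax : a = x
      · subst hax
        rw [if_neg (by simp), if_neg (by simp), List.filter_filter]
        rw [show (fun y => ((!(y == a)) && !(y == a))) = (fun y : String => !(y == a)) from
          funext (fun y => Bool.and_self _)]
        exact ih a
      · have hb : (a == x) = false := beq_eq_false_iff_ne.mpr hax
        rw [if_pos (by rw [hb]; rfl), if_pos (by rw [hb]; rfl)]
        rw [PySem.Set.ofList_cons, discard_eq_filter, ← ih x]
        congr 1
        rw [List.filter_filter, List.filter_filter]
        exact List.filter_congr (fun y _ => Bool.and_comm _ _)

-- ordered first-occurrence dedup peels its head's duplicates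
theorem ofList_cons_filter (x : String) (l : List String) :
    PySem.Set.ofList (x :: l) = x :: PySem.Set.ofList (l.filter (fun y => !(y == x))) := by
  rw [PySem.Set.ofList_cons, discard_eq_filter, ofList_filter_ne]

-- the core: values of A's dict fold = B's recursive pick, for any string list
theorem values_eq_pick (n : Nat) : ∀ (cs : List String), cs.length ≤ n →
    (PySem.Set.ofList (cs.map PySem.Str.lower)).map
      (fun k => pvBestF "" (cs.filter (fun t => PySem.Str.lower t == k))) = pvPick cs := by
  induction n with
  | zero =>
      intro cs h
      rw [List.length_eq_zero_iff.mp (Nat.le_zero.mp h)]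
      simp [pvPick]
  | succ n ih =>
      intro cs h
      match cs with
      | [] => simp [pvPick]
      | c :: rest =>
        rw [pvPick]
        rw [List.map_cons, ofList_cons_filter, List.map_cons]
        congr 1
        · -- head: the longest form for c's key
          rw [List.filter_cons, if_pos (by simp)]
          show pvBestF "" (c :: rest.filter (fun t => PySem.Str.lower t == PySem.Str.lower c)) = _
          unfold pvBestF
          rw [List.foldl_cons, pvStep_empty]
          exact (guard_fold_eq_filter (PySem.Str.lower c) rest c).symm
        · -- tail: keys ≠ lower c; filters agree after removing c's key
          have hfm : (rest.map PySem.Str.lower).filter (fun y => !(y == PySem.Str.lower c))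
              = (rest.filter (fun t => !(PySem.Str.lower t == PySem.Str.lower c))).map
                  PySem.Str.lower := by
            rw [List.filter_map]
            rfl
          rw [hfm]
          have hlen : (rest.filter (fun t => !(PySem.Str.lower t == PySem.Str.lower c))).length ≤ n := by
            have := List.length_filter_le (fun t => !(PySem.Str.lower t == PySem.Str.lower c)) rest
            simp only [List.length_cons] at h
            omega
          rw [← ih _ hlen]
          apply List.map_congr_left
          intro k hkmem
          have hknec : k ≠ PySem.Str.lower c := by
            have hmm := (PySem.Set.mem_ofList _ k).mp hkmem
            obtain ⟨t, ht, rfl⟩ := List.mem_map.mp hmm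
            have := (List.mem_filter.mp ht).2
            simpa using this
          congr 1
          rw [List.filter_cons, if_neg (by simpa using fun hEq => hknec hEq.symm),
            List.filter_filter]
          apply List.filter_congr
          intro t _
          by_cases ht : PySem.Str.lower t = k
          · simp [ht, hknec]
          · simp [ht]

-- ===== VERDICT (by name: the statement is the Claim_ definition above) =====
theorem dedup_and_join_py_spec : Claim_equal_dedup_and_join_py := by
  intro vals _
  unfold Spec_dedup_and_join_py dedup_and_join_py dedup_and_join_py_alt
  dsimp only []
  rw [foldA_eq_cleaned]
  set cs := (vals.map PySem.Str.strip).filter (fun s => !(s == "")) with hcs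
  have hkeys : (cs.foldl pvUpd PySem.Dict.empty).keys
      = PySem.Set.ofList (cs.map PySem.Str.lower) := by
    rw [keys_foldl_upd]
    exact PySem.Set.update_nil_left _
  have hnodup : (cs.foldl pvUpd PySem.Dict.empty).keys.Nodup := by
    rw [hkeys]; exact PySem.Set.nodup_ofList _
  rw [PySem.Dict.values_eq_map_keys _ hnodup "", hkeys]
  rw [List.map_congr_left (fun k _ => getD_foldl_upd cs PySem.Dict.empty k)]
  exact congrArg (PySem.Str.join " and ") (values_eq_pick cs.length cs (le_refl _))
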